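-- pv_equiv track=rewrite | github.com/miliar/Code_Jam_Webscraper | solutions_python/Problem_178/4537.py | findSwaps
-- ===== SOURCE A (Python) =====
-- def getNextChunkSize(line, l, i):
--     #print ("getNextChunkSize: START", line, l, i)
--     if not (i < l):
--         #print ("getNextChunkSize: END", 0)
--         return 0
--     size = 1
--     while i+size < l and line[i+size] == line[i+size-1]:
--         size += 1
--     #print ("getNextChunkSize: END", size)
--     return size
--
-- def findSwaps(line):
--     #print ("findSwaps: START", line)
--     count = 0
--     i = 0
--     l = len(line)
--     if i < l and line[0] == '-':
--         i += getNextChunkSize(line, l, i)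
--         count += 1
--     while i < l:
--         sizePositive = getNextChunkSize(line, l, i)
--         sizeNegative = getNextChunkSize(line, l, i+sizePositive)
--         i += sizePositive + sizeNegative
--         if sizeNegative:
--             count += 2
--     #print ("findSwaps: END", count)
--     return count
-- ===== SOURCE B (Python) =====
-- def findSwaps(line):
--     if not line:
--         return 0
--     m = 1
--     for k in range(1, len(line)):
--         if line[k] != line[k - 1]:
--             m += 1
--     if line[0] == '-':
--         return 1 + 2 * ((m - 1) // 2)
--     return 2 * (m // 2)
-- ===== Notes on version B (the rewrite author's own statement) =====
-- stated objective: simpler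
-- what changed: Replaces the chunk-size helper and the run-pairing while-loop with a single linear scan that counts maximal runs, followed by a closed-form arithmetic expression for the answer; the single pass without per-chunk helper calls is also a measured constant-factor speedup.
import Mathlib
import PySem

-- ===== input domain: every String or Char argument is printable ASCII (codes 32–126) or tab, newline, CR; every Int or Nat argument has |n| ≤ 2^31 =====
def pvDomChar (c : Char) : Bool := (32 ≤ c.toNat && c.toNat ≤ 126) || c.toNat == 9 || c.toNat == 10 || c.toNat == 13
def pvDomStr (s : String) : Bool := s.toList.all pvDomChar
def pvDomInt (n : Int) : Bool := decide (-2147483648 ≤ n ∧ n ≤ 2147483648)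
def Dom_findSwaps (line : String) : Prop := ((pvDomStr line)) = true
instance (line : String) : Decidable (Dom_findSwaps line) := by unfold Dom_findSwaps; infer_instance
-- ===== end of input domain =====

-- B replaces A's chunk-size helper and run-pairing loop by one run-counting scan plus a closed-form formula (objective: simpler).


-- ===== PORT A =====
-- inner while loop of getNextChunkSize: 'while i+size < l and line[i+size] == line[i+size-1]: size += 1'
def chunkLoop (cs : List Char) (l i size : Int) : Int :=
  if h : i + size < l ∧ PySem.List.pyGet? cs (i + size) = PySem.List.pyGet? cs (i + size - 1) then
    chunkLoop cs l i (size + 1)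
  else size
termination_by (l - (i + size)).toNat
decreasing_by omega

def getNextChunkSize (cs : List Char) (l i : Int) : Int :=
  if ¬ (i < l) then 0 else chunkLoop cs l i 1

-- the port's while loop needs these termination facts, so they are stated here (above the claim block)
theorem chunkLoop_ge (cs : List Char) (l i size : Int) : size ≤ chunkLoop cs l i size := by
  unfold chunkLoop
  split
  · have := chunkLoop_ge cs l i (size + 1)
    omega
  · omega
termination_by (l - (i + size)).toNat
decreasing_by omega

theorem getNextChunkSize_pos (cs : List Char) (l i : Int) (h : i < l) :
    1 ≤ getNextChunkSize cs l i := by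
  unfold getNextChunkSize
  simp [h]
  exact chunkLoop_ge cs l i 1

theorem getNextChunkSize_nonneg (cs : List Char) (l i : Int) :
    0 ≤ getNextChunkSize cs l i := by
  unfold getNextChunkSize
  split
  · omega
  · have := chunkLoop_ge cs l i 1; omega

-- main while loop of findSwaps
def fsLoop (cs : List Char) (l i count : Int) : Int :=
  if h : i < l then
    let sizePositive := getNextChunkSize cs l i
    let sizeNegative := getNextChunkSize cs l (i + sizePositive)
    fsLoop cs l (i + sizePositive + sizeNegative) (if sizeNegative ≠ 0 then count + 2 else count)
  else count
termination_by (l - i).toNat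
decreasing_by
  have h1 := getNextChunkSize_pos cs l i h
  have h2 := getNextChunkSize_nonneg cs l (i + getNextChunkSize cs l i)
  omega

def findSwaps (line : String) : Int :=
  let cs := line.toList
  let l : Int := cs.length
  let count : Int := 0
  let i : Int := 0
  let (i, count) :=
    if i < l ∧ PySem.List.pyGet? cs 0 = some '-' then
      (i + getNextChunkSize cs l i, count + 1)
    else (i, count)
  fsLoop cs l i count

-- ===== PORT B =====
-- one scan: m starts at 1, incremented whenever line[k] ≠ line[k-1]
def runCountAux (prev : Char) (cs : List Char) (m : Int) : Int :=
  match cs with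
  | [] => m
  | c :: rest => runCountAux c rest (if c ≠ prev then m + 1 else m)

def findSwaps_alt (line : String) : Int :=
  match line.toList with
  | [] => 0
  | c :: rest =>
    let m := runCountAux c rest 1
    if c = '-' then 1 + 2 * PySem.Int.floordiv (m - 1) 2
    else 2 * PySem.Int.floordiv m 2

-- ===== PRECONDITION & SPEC =====
def Spec_findSwaps (line : String) (out : Int) : Prop := out = findSwaps_alt line
instance (line : String) (out : Int) : Decidable (Spec_findSwaps line out) := by unfold Spec_findSwaps; infer_instance

-- ===== CLAIM (what is proved, stated in full; the proofs are below) =====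
def Claim_equal_findSwaps : Prop := ∀ (line : String), Dom_findSwaps line → Spec_findSwaps line (findSwaps line)

-- ===== LEMMAS AND PROOFS =====

-- length of the chain of consecutive equal characters extending a run anchored at `a`
def chain (a : Char) : List Char → Nat
  | [] => 0
  | b :: t => if b = a then 1 + chain b t else 0

theorem chain_le (a : Char) (t : List Char) : chain a t ≤ t.length := by
  induction t generalizing a with
  | nil => simp [chain]
  | cons b t ih =>
    simp only [chain, List.length_cons]
    split
    · have := ih b; omega
    · omega

-- number of maximal runs (structural spec both ports are reduced to)
def runsL : List Char → Int
  | [] => 0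
  | a :: t => 1 + runsL (t.drop (chain a t))
termination_by cs => cs.length
decreasing_by have := chain_le a t; simp

theorem runsL_nil : runsL [] = 0 := by simp [runsL]

theorem runsL_cons (a : Char) (t : List Char) :
    runsL (a :: t) = 1 + runsL (t.drop (chain a t)) := by rw [runsL.eq_def]

theorem fsLoop_step (cs : List Char) (l i count : Int) (h : i < l) :
    fsLoop cs l i count =
      fsLoop cs l (i + getNextChunkSize cs l i + getNextChunkSize cs l (i + getNextChunkSize cs l i))
        (if getNextChunkSize cs l (i + getNextChunkSize cs l i) ≠ 0 then count + 2 else count) := by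
  rw [fsLoop]; simp [h]

theorem fsLoop_end (cs : List Char) (l i count : Int) (h : ¬ i < l) :
    fsLoop cs l i count = count := by rw [fsLoop]; simp [h]

theorem runsL_nonneg (cs : List Char) : 0 ≤ runsL cs := by
  induction hn : cs.length using Nat.strong_induction_on generalizing cs with
  | _ n ih =>
    cases cs with
    | nil => simp [runsL_nil]
    | cons a t =>
      rw [runsL_cons]
      have hc := chain_le a t
      have := ih ((t.drop (chain a t)).length) (by simp at hn ⊢; omega) _ rfl
      omega

theorem chunkLoop_eq (cs : List Char) (i size : Int) (a : Char) (t : List Char)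
    (h0 : 0 ≤ i + size - 1)
    (hd : cs.drop (i + size - 1).toNat = a :: t) :
    chunkLoop cs cs.length i size = size + chain a t := by
  induction t generalizing a size with
  | nil =>
    have hlen : cs.length - (i + size - 1).toNat = 1 := by
      have := congrArg List.length hd; simpa using this
    have hle : (i + size - 1).toNat < cs.length := by omega
    unfold chunkLoop
    have : ¬ (i + size < (cs.length : Int)) := by omega
    simp [this, chain]
  | cons b t ih =>
    have hlen : cs.length - (i + size - 1).toNat = t.length + 2 := by
      have := congrArg List.length hd; simpa using this
    have hlt : i + size < (cs.length : Int) := by omega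
    have hga : PySem.List.pyGet? cs (i + size - 1) = some a := by
      rw [PySem.List.pyGet?_of_nonneg _ h0]
      have : cs[(i + size - 1).toNat]? = (cs.drop (i + size - 1).toNat).head? := by
        rw [List.head?_drop]
      rw [this, hd]; rfl
    have hnext : (i + size).toNat = (i + size - 1).toNat + 1 := by omega
    have hdb : cs.drop (i + size).toNat = b :: t := by
      rw [hnext, ← List.drop_drop, hd]; rfl
    have hgb : PySem.List.pyGet? cs (i + size) = some b := by
      rw [PySem.List.pyGet?_of_nonneg _ (by omega)]
      have : cs[(i + size).toNat]? = (cs.drop (i + size).toNat).head? := by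
        rw [List.head?_drop]
      rw [this, hdb]; rfl
    unfold chunkLoop
    by_cases hba : b = a
    · have : i + size < (cs.length : Int) ∧
          PySem.List.pyGet? cs (i + size) = PySem.List.pyGet? cs (i + size - 1) := by
        refine ⟨hlt, ?_⟩; rw [hga, hgb, hba]
      rw [dif_pos this]
      have hrec := ih (size + 1) b (by omega) (by rw [show (i+(size+1)-1) = i + size by ring, hdb])
      rw [hrec]
      simp [chain, hba]; ring
    · have : ¬ (i + size < (cs.length : Int) ∧
          PySem.List.pyGet? cs (i + size) = PySem.List.pyGet? cs (i + size - 1)) := by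
        rintro ⟨-, he⟩
        rw [hga, hgb] at he
        exact hba (Option.some.inj he)
      rw [dif_neg this]
      simp [chain, hba]

theorem getNextChunkSize_eq (cs : List Char) (i : Int) (a : Char) (t : List Char)
    (h0 : 0 ≤ i) (hd : cs.drop i.toNat = a :: t) :
    getNextChunkSize cs cs.length i = 1 + chain a t := by
  have hlt : i < (cs.length : Int) := by
    have := congrArg List.length hd; simp at this; omega
  unfold getNextChunkSize
  rw [if_neg (by omega)]
  have := chunkLoop_eq cs i 1 a t (by omega) (by simpa using hd)
  omega

theorem fsLoop_eq (cs : List Char) (i : Int) (count : Int)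
    (h0 : 0 ≤ i) (hle : i ≤ (cs.length : Int)) :
    fsLoop cs cs.length i count = count + 2 * (runsL (cs.drop i.toNat) / 2) := by
  induction hfuel : (cs.length - i).toNat using Nat.strong_induction_on
    generalizing i count with
  | _ n ih =>
  by_cases h : i < (cs.length : Int)
  · obtain ⟨a, t, hd⟩ : ∃ a t, cs.drop i.toNat = a :: t := by
      have hlt : i.toNat < cs.length := by omega
      cases hcs : cs.drop i.toNat with
      | nil => have := congrArg List.length hcs; simp at this; omega
      | cons a t => exact ⟨a, t, rfl⟩
    have hsp := getNextChunkSize_eq cs i a t h0 hd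
    have hchain := chain_le a t
    have hlen : cs.length - i.toNat = t.length + 1 := by
      have := congrArg List.length hd; simpa using this
    have hdt : cs.drop (i + (1 + chain a t)).toNat = t.drop (chain a t) := by
      have : (i + (1 + (chain a t : Int))).toNat = i.toNat + 1 + chain a t := by omega
      rw [this, ← List.drop_drop, ← List.drop_drop, hd]
      simp
    rw [fsLoop_step cs cs.length i count h, hsp]
    cases hcs2 : t.drop (chain a t) with
    | nil =>
      have hend : i + (1 + (chain a t : Int)) = cs.length := by
        have := congrArg List.length hcs2; simp at this; omega
      have hsn : getNextChunkSize cs cs.length (i + (1 + chain a t)) = 0 := by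
        unfold getNextChunkSize; rw [if_pos (by omega)]
      rw [hsn, if_neg (by norm_num),
        fsLoop_end cs cs.length (i + (1 + (chain a t : Int)) + 0) count (by omega)]
      have : runsL (cs.drop i.toNat) = 1 := by
        rw [hd, runsL_cons, hcs2, runsL_nil]
        norm_num
      rw [this]
      omega
    | cons b t2 =>
      rw [hcs2] at hdt
      have hsn := getNextChunkSize_eq cs (i + (1 + chain a t)) b t2 (by omega) hdt
      rw [hsn, if_pos (by omega)]
      have hcb := chain_le b t2
      have hlen2 : t.length - chain a t = t2.length + 1 := by
        have := congrArg List.length hcs2; simpa using this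
      have hrec := ih ((cs.length : Int) - (i + (1 + chain a t) + (1 + chain b t2))).toNat
        (by omega) (i + (1 + chain a t) + (1 + chain b t2))
        (count + 2) (by omega) (by omega) rfl
      rw [hrec]
      have hdt2 : cs.drop (i + (1 + (chain a t : Int)) + (1 + chain b t2)).toNat
          = t2.drop (chain b t2) := by
        have : (i + (1 + (chain a t : Int)) + (1 + chain b t2)).toNat
            = (i + (1 + (chain a t : Int))).toNat + (1 + chain b t2) := by omega
        rw [this, ← List.drop_drop, hdt,
          Nat.add_comm 1 (chain b t2), List.drop_succ_cons]
      rw [hdt2]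
      have hruns : runsL (cs.drop i.toNat) = 2 + runsL (t2.drop (chain b t2)) := by
        rw [hd, runsL_cons, hcs2, runsL_cons]; ring
      rw [hruns]
      have hnn := runsL_nonneg (t2.drop (chain b t2))
      omega
  · rw [fsLoop_end cs cs.length i count h]
    have : cs.drop i.toNat = [] := by
      apply List.drop_eq_nil_of_le; omega
    rw [this, runsL_nil]
    norm_num

theorem runCountAux_eq (a : Char) (t : List Char) (m : Int) :
    runCountAux a t m = m + (runsL (a :: t) - 1) := by
  induction t generalizing a m with
  | nil => simp [runCountAux, runsL_cons, runsL_nil, chain]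
  | cons b t ih =>
    have hsplit : runsL (a :: b :: t) = (if b ≠ a then 1 else 0) + runsL (b :: t) := by
      by_cases hba : b = a
      · subst hba
        rw [runsL_cons, runsL_cons]
        have hch : chain b (b :: t) = 1 + chain b t := by simp [chain]
        rw [hch, Nat.add_comm, List.drop_succ_cons]
        simp
      · rw [runsL_cons]
        simp [chain, hba]
    unfold runCountAux
    rw [ih, hsplit]
    by_cases hba : b = a <;> simp [hba]

-- ===== VERDICT (by name: the statement is the Claim_ definition above) =====
theorem findSwaps_spec : Claim_equal_findSwaps := by
  intro line _
  unfold Spec_findSwaps findSwaps findSwaps_alt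
  cases hcs : line.toList with
  | nil => simp [fsLoop]
  | cons a t =>
    show (match (if (0:Int) < ((a :: t).length : Int) ∧ PySem.List.pyGet? (a :: t) 0 = some '-' then
            ((0:Int) + getNextChunkSize (a :: t) ((a :: t).length : Int) 0, (0:Int) + 1)
          else ((0:Int), (0:Int))) with
      | (i, count) => fsLoop (a :: t) ((a :: t).length : Int) i count)
      = (have m := runCountAux a t 1;
         if a = '-' then 1 + 2 * PySem.Int.floordiv (m - 1) 2 else 2 * PySem.Int.floordiv m 2)
    have hlen : (0 : Int) < ((a :: t).length : Int) := by simp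
    have hget : PySem.List.pyGet? (a :: t) 0 = some a :=
      PySem.List.pyGet?_zero_cons a t
    have hm := runCountAux_eq a t 1
    have hnn := runsL_nonneg (a :: t)
    have hrpos : 1 ≤ runsL (a :: t) := by
      rw [runsL_cons]; have := runsL_nonneg (t.drop (chain a t)); omega
    by_cases hdash : a = '-'
    · rw [if_pos ⟨hlen, by rw [hget, hdash]⟩]
      have hsp := getNextChunkSize_eq (a :: t) 0 a t le_rfl (by simp)
      have hfs := fsLoop_eq (a :: t) (0 + (1 + chain a t)) 1 (by omega)
        (by have := chain_le a t
            have h2 : (a :: t).length = t.length + 1 := rfl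
            omega)
      have hdrop : (a :: t).drop ((0 : Int) + (1 + (chain a t : Int))).toNat = t.drop (chain a t) := by
        have : ((0 : Int) + (1 + (chain a t : Int))).toNat = 1 + chain a t := by omega
        rw [this, Nat.add_comm 1 (chain a t), List.drop_succ_cons]
      simp only [hsp]
      show fsLoop (a :: t) ((a :: t).length : Int) (0 + (1 + (chain a t : Int))) 1
          = if a = '-' then 1 + 2 * PySem.Int.floordiv (runCountAux a t 1 - 1) 2
            else 2 * PySem.Int.floordiv (runCountAux a t 1) 2
      rw [hfs, hdrop, if_pos hdash, hm]
      have hruns := runsL_cons a t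
      rw [PySem.Int.floordiv_eq_ediv_of_pos (by omega : (0:Int) < 2)]
      omega
    · rw [if_neg (by rintro ⟨-, he⟩; rw [hget] at he; exact hdash (Option.some.inj he))]
      show fsLoop (a :: t) ((a :: t).length : Int) 0 0
          = if a = '-' then 1 + 2 * PySem.Int.floordiv (runCountAux a t 1 - 1) 2
            else 2 * PySem.Int.floordiv (runCountAux a t 1) 2
      have hfs := fsLoop_eq (a :: t) 0 0 le_rfl (by simp; omega)
      simp only [Int.toNat_zero, List.drop_zero] at hfs
      rw [hfs, if_neg hdash, hm]
      rw [PySem.Int.floordiv_eq_ediv_of_pos (by omega : (0:Int) < 2)]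
      omega
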